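-- pv_equiv track=rewrite | github.com/Nama21yo/Natnael_CP | C_Escape_Proof_Transfers.py | solve
-- ===== SOURCE A (Python) =====
-- def solve(n,t,c,pr):
--     count = 0
--     l = 0
--     r = 0
--     while r < n:
--         if l < n and pr[r] > t:
--             l = r + 1
--         if l < n and r - l + 1 >= c:
--             count += 1
--         r += 1
--     return count
-- ===== SOURCE B (Python) =====
-- def solve(n, t, c, pr):
--     # Separator decomposition: elements > t split [0, n) into maximal gaps of
--     # elements <= t; a gap of length L contains max(0, L - c + 1) windows.
--     breaks = [i for i in range(n) if pr[i] > t]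
--     total = 0
--     prev = -1
--     for b in breaks + [n]:
--         gap = b - prev - 1
--         if gap - c + 1 > 0:
--             total += gap - c + 1
--         prev = b
--     return total
-- ===== Notes on version B (the rewrite author's own statement) =====
-- stated objective: alternative
-- what changed: Replaces the per-element sliding-window count (left pointer l, window-completion test at every r) by a staged separator decomposition: first collect the positions of elements > t, then add the closed-form contribution max(0, L - c + 1) for each maximal gap of length L between consecutive separators.
-- intended difference: When c <= 0 (a degenerate window length: with n >= 0, or with n < 0 and c <= n), A returns n minus one if pr[n-1] > t and n otherwise because its 'l < n' guard counts empty windows, while B returns the per-gap sum in which every gap of length L contributes L - c + 1 windows (e.g. n+1-c more than A for an all-good array), the consistent count of windows of length >= c. — e.g. on solve(3, 0, 0, [0, 0, 1]): A returns 2, B returns 4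
import Mathlib
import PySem

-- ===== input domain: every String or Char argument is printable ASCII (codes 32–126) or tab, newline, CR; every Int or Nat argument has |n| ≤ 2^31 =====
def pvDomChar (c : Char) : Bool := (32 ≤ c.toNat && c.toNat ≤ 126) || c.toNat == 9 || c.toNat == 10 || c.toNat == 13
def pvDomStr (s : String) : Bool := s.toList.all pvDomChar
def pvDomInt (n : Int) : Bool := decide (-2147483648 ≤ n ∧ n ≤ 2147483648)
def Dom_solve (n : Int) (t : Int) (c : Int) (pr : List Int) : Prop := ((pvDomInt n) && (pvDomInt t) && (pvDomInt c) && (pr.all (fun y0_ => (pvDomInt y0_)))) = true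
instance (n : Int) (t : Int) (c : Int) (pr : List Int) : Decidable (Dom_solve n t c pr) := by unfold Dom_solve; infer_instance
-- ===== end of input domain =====

-- B replaces A's per-element sliding-window count by a staged separator decomposition
-- (collect positions of elements > t, then a closed-form contribution per gap); same O(n) cost.

-- ===== PORT A =====
-- `while r < n` runs exactly n.toNat times since r starts at 0 and increases by 1; fuel = n.toNat.
-- pr[r] is ported as (pyGet? pr r).getD 0: inside Pre_solve (n ≤ len pr) the index is always in range,
-- so the default is never used there; outside Pre_ Python raises IndexError.
def solveLoopA (n : Int) (t : Int) (c : Int) (pr : List Int) : Nat → Int → Int → Int → Int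
  | 0, count, _, _ => count
  | fuel+1, count, l, r =>
    let l' := if l < n ∧ t < (PySem.List.pyGet? pr r).getD 0 then r + 1 else l
    let count' := if l' < n ∧ r - l' + 1 ≥ c then count + 1 else count
    solveLoopA n t c pr fuel count' l' (r + 1)

def solve (n : Int) (t : Int) (c : Int) (pr : List Int) : Int :=
  solveLoopA n t c pr n.toNat 0 0 0

-- ===== PORT B =====
-- `breaks = [i for i in range(n) if pr[i] > t]` as a filter of pyRange; the for-loop over
-- breaks + [n] as a foldl with state (total, prev); pr[i] ported as in A's port.
def solve_alt (n : Int) (t : Int) (c : Int) (pr : List Int) : Int :=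
  let breaks := (PySem.List.pyRange 0 n 1).filter (fun i => decide (t < (PySem.List.pyGet? pr i).getD 0))
  ((breaks ++ [n]).foldl (fun (s : Int × Int) b =>
      let gap := b - s.2 - 1
      (if 0 < gap - c + 1 then s.1 + (gap - c + 1) else s.1, b)) (0, -1)).1

-- ===== PRECONDITION & SPEC =====
-- A raises IndexError iff n > len(pr) (the loop reaches r = len(pr)); B raises there too.
def Pre_solve (n : Int) (t : Int) (c : Int) (pr : List Int) : Prop := n ≤ (pr.length : Int)
instance (n : Int) (t : Int) (c : Int) (pr : List Int) : Decidable (Pre_solve n t c pr) := by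
  unfold Pre_solve; infer_instance

def pvWitness_solve : Int × Int × Int × List Int := (3, 0, 1, [0, 0, 1])

-- When c ≤ 0 (a degenerate window length: with n ≥ 0, or with n < 0 and c ≤ n), A returns n-1
-- if pr[n-1] > t and n otherwise because its 'l < n' guard counts empty windows, while B returns
-- the per-gap sum in which every gap of length L contributes L - c + 1 windows, the consistent
-- count of windows of length ≥ c.
def D_solve (n : Int) (t : Int) (c : Int) (pr : List Int) : Prop :=
  c ≤ 0 ∧ (0 ≤ n ∨ c ≤ n)
instance (n : Int) (t : Int) (c : Int) (pr : List Int) : Decidable (D_solve n t c pr) := by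
  unfold D_solve; infer_instance

def Spec_solve (n : Int) (t : Int) (c : Int) (pr : List Int) (out : Int) : Prop :=
  ¬ D_solve n t c pr → out = solve_alt n t c pr
instance (n : Int) (t : Int) (c : Int) (pr : List Int) (out : Int) : Decidable (Spec_solve n t c pr out) := by
  unfold Spec_solve; infer_instance

def pvDiffWitness_solve : Int × Int × Int × List Int := (3, 0, 0, [0, 0, 1])
def pvDiffWitnessOut_solve : Int × Int := (2, 4)

-- ===== CLAIM (what is proved, stated in full; the proofs are below) =====
def Claim_unchanged_solve : Prop := ∀ (n : Int) (t : Int) (c : Int) (pr : List Int), Dom_solve n t c pr → Pre_solve n t c pr → Spec_solve n t c pr (solve n t c pr)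
def Claim_changed_solve : Prop := Dom_solve (pvDiffWitness_solve.1) (pvDiffWitness_solve.2.1) (pvDiffWitness_solve.2.2.1) (pvDiffWitness_solve.2.2.2) ∧ Pre_solve (pvDiffWitness_solve.1) (pvDiffWitness_solve.2.1) (pvDiffWitness_solve.2.2.1) (pvDiffWitness_solve.2.2.2) ∧ D_solve (pvDiffWitness_solve.1) (pvDiffWitness_solve.2.1) (pvDiffWitness_solve.2.2.1) (pvDiffWitness_solve.2.2.2) ∧ solve (pvDiffWitness_solve.1) (pvDiffWitness_solve.2.1) (pvDiffWitness_solve.2.2.1) (pvDiffWitness_solve.2.2.2) = pvDiffWitnessOut_solve.1 ∧ solve_alt (pvDiffWitness_solve.1) (pvDiffWitness_solve.2.1) (pvDiffWitness_solve.2.2.1) (pvDiffWitness_solve.2.2.2) = pvDiffWitnessOut_solve.2 ∧ pvDiffWitnessOut_solve.1 ≠ pvDiffWitnessOut_solve.2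
def Claim_exact_solve : Prop := ∀ (n : Int) (t : Int) (c : Int) (pr : List Int), Dom_solve n t c pr → Pre_solve n t c pr → D_solve n t c pr → solve n t c pr ≠ solve_alt n t c pr

-- ===== LEMMAS AND PROOFS =====

-- B's gap sum as a plain recursion over the separator list
def gapSum (c : Int) : Int → List Int → Int
  | _, [] => 0
  | prev, b :: bs => (if 0 < b - prev - c then b - prev - c else 0) + gapSum c b bs

lemma foldB_eq_gapSum (c : Int) :
    ∀ (bs : List Int) (total prev : Int),
      (bs.foldl (fun (s : Int × Int) b =>
          let gap := b - s.2 - 1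
          (if 0 < gap - c + 1 then s.1 + (gap - c + 1) else s.1, b)) (total, prev)).1
        = total + gapSum c prev bs := by
  intro bs
  induction bs with
  | nil => intro total prev; simp [gapSum]
  | cons b bs ih =>
    intro total prev
    rw [List.foldl_cons]
    simp only []
    rw [ih]
    simp only [gapSum]
    have he : b - prev - 1 - c + 1 = b - prev - c := by ring
    rw [he]
    generalize gapSum c b bs = G
    split_ifs <;> omega

-- A's loop against the gap sum over the remaining separators, for c ≥ 1: the subtracted term
-- is the part of the current gap's contribution that A has already counted before step r.
lemma loopA_eq_gapSum (n t c : Int) (pr : List Int) (hc : 1 ≤ c) :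
    ∀ (fuel : Nat) (count l r : Int), l ≤ r → r ≤ n → fuel = (n - r).toNat →
      solveLoopA n t c pr fuel count l r
        = count + gapSum c (l - 1)
            (((PySem.List.pyRange r n 1).filter (fun i => decide (t < (PySem.List.pyGet? pr i).getD 0))) ++ [n])
          - (if 0 < r - l - c + 1 then r - l - c + 1 else 0) := by
  intro fuel
  induction fuel with
  | zero =>
    intro count l r h1 h2 h3
    have hrn : r = n := by omega
    rw [PySem.List.pyRange_one_eq_nil (by omega)]
    simp only [solveLoopA, List.filter_nil, List.nil_append, gapSum]
    generalize hG : gapSum c n [] = G at *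
    simp only [gapSum] at hG
    split_ifs <;> omega
  | succ k ih =>
    intro count l r h1 h2 h3
    have hr : r < n := by omega
    have hln : l < n := by omega
    by_cases hg : t < (PySem.List.pyGet? pr r).getD 0
    · -- pr[r] > t : r is a separator; A resets l to r+1 and cannot count this step (c ≥ 1)
      have hfil : (PySem.List.pyRange r n 1).filter (fun i => decide (t < (PySem.List.pyGet? pr i).getD 0))
          = r :: (PySem.List.pyRange (r + 1) n 1).filter (fun i => decide (t < (PySem.List.pyGet? pr i).getD 0)) := by
        rw [PySem.List.pyRange_one_cons hr, List.filter_cons]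
        simp [hg]
      rw [hfil]
      have hl' : (if l < n ∧ t < (PySem.List.pyGet? pr r).getD 0 then r + 1 else l) = r + 1 :=
        if_pos ⟨hln, hg⟩
      simp only [solveLoopA, hl']
      rw [if_neg (by omega : ¬ (r + 1 < n ∧ r - (r + 1) + 1 ≥ c))]
      rw [ih count (r + 1) (r + 1) (by omega) (by omega) (by omega)]
      simp only [List.cons_append, gapSum]
      rw [show r + 1 - 1 = r from by ring]
      generalize gapSum c r ((PySem.List.pyRange (r + 1) n 1).filter
        (fun i => decide (t < (PySem.List.pyGet? pr i).getD 0)) ++ [n]) = G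
      split_ifs <;> omega
    · -- pr[r] ≤ t : l is unchanged; A counts iff the window ending at r has length ≥ c
      have hfil : (PySem.List.pyRange r n 1).filter (fun i => decide (t < (PySem.List.pyGet? pr i).getD 0))
          = (PySem.List.pyRange (r + 1) n 1).filter (fun i => decide (t < (PySem.List.pyGet? pr i).getD 0)) := by
        rw [PySem.List.pyRange_one_cons hr, List.filter_cons]
        simp [hg]
      rw [hfil]
      have hl' : (if l < n ∧ t < (PySem.List.pyGet? pr r).getD 0 then r + 1 else l) = l :=
        if_neg (by tauto)
      simp only [solveLoopA, hl']
      by_cases hw : r - l + 1 ≥ c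
      · rw [if_pos ⟨hln, hw⟩, ih (count + 1) l (r + 1) (by omega) (by omega) (by omega)]
        generalize gapSum c (l - 1) ((PySem.List.pyRange (r + 1) n 1).filter
          (fun i => decide (t < (PySem.List.pyGet? pr i).getD 0)) ++ [n]) = G
        split_ifs <;> omega
      · rw [if_neg (by tauto : ¬ (l < n ∧ r - l + 1 ≥ c)),
            ih count l (r + 1) (by omega) (by omega) (by omega)]
        generalize gapSum c (l - 1) ((PySem.List.pyRange (r + 1) n 1).filter
          (fun i => decide (t < (PySem.List.pyGet? pr i).getD 0)) ++ [n]) = G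
        split_ifs <;> omega

-- A's count rises by at most one per iteration
lemma loopA_le (n t c : Int) (pr : List Int) :
    ∀ (fuel : Nat) (count l r : Int), solveLoopA n t c pr fuel count l r ≤ count + fuel := by
  intro fuel
  induction fuel with
  | zero => intro count l r; simp [solveLoopA]
  | succ k ih =>
    intro count l r
    simp only [solveLoopA]
    split_ifs <;>
      exact le_trans (ih _ _ _) (by push_cast; omega)
-- with c ≤ 0 every gap, even an empty one, contributes at least one window
lemma gapSum_ge (c : Int) (hc : c ≤ 0) :
    ∀ (bs : List Int) (prev m : Int), m - prev ≤ gapSum c prev (bs ++ [m]) := by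
  intro bs
  induction bs with
  | nil => intro prev m; simp only [List.nil_append, gapSum]; split_ifs <;> omega
  | cons b bs ih =>
    intro prev m
    simp only [List.cons_append, gapSum]
    have := ih b m
    split_ifs <;> omega

-- ===== VERDICT (by name: the statement is the Claim_ definition above) =====
theorem solve_spec : Claim_unchanged_solve := by
  intro n t c pr _hDom _hPre hnD
  unfold solve solve_alt
  rw [foldB_eq_gapSum]
  by_cases hc : 1 ≤ c
  · by_cases hn : 0 ≤ n
    · rw [loopA_eq_gapSum n t c pr hc n.toNat 0 0 0 (by omega) (by omega) (by omega)]
      rw [if_neg (by omega : ¬ (0 < 0 - 0 - c + 1))]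
      norm_num
    · -- n < 0 : A's loop body never runs, and B's only gap has negative length n < c
      have hfz : n.toNat = 0 := by omega
      rw [hfz, PySem.List.pyRange_one_eq_nil (by omega)]
      simp only [solveLoopA, List.filter_nil, List.nil_append, gapSum]
      rw [if_neg (by omega : ¬ (0 < n - (-1) - c))]
      omega
  · -- c ≤ 0 outside D_ : n < 0 and n < c, so both sides are 0
    have hD : ¬ (0 ≤ n ∨ c ≤ n) := fun h => hnD ⟨by omega, h⟩
    have hn : n < 0 := by omega
    have hcn : n < c := by omega
    have hfz : n.toNat = 0 := by omega
    rw [hfz, PySem.List.pyRange_one_eq_nil (by omega)]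
    simp only [solveLoopA, List.filter_nil, List.nil_append, gapSum]
    rw [if_neg (by omega : ¬ (0 < n - (-1) - c))]
    omega

theorem solve_changed : Claim_changed_solve := by
  unfold Claim_changed_solve; decide

theorem solve_tight : Claim_exact_solve := by
  intro n t c pr _hDom _hPre hD
  obtain ⟨hc, hOr⟩ := hD
  unfold solve solve_alt
  rw [foldB_eq_gapSum]
  by_cases hn : 0 ≤ n
  · -- A ≤ n < n + 1 ≤ B
    have hA := loopA_le n t c pr n.toNat 0 0 0
    have hB := gapSum_ge c hc
      ((PySem.List.pyRange 0 n 1).filter (fun i => decide (t < (PySem.List.pyGet? pr i).getD 0))) (-1) n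
    intro h
    rw [h] at hA
    omega
  · -- n < 0, hence c ≤ n : A = 0 while B = n - c + 1 ≥ 1
    have hcn : c ≤ n := by omega
    have hfz : n.toNat = 0 := by omega
    rw [hfz, PySem.List.pyRange_one_eq_nil (by omega)]
    simp only [solveLoopA, List.filter_nil, List.nil_append, gapSum]
    rw [if_pos (by omega : 0 < n - (-1) - c)]
    omega
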